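-- pv_equiv track=rewrite | github.com/nermadie/CodeForces_Solutions | CodeforcesRound960Div2/prob02.py | solve
-- ===== SOURCE A (Python) =====
-- def solve(n, x, y):
--     result = []
--     if y % 2 == 0:
--         for i in range(1, y):
--             if i % 2 == 1:
--                 result.append("-1")
--             else:
--                 result.append("1")
--     else:
--         for i in range(1, y):
--             if i % 2 == 1:
--                 result.append("1")
--             else:
--                 result.append("-1")
--     result.extend(["1"] * (x - y + 1))
--     for i in range(x + 1, n + 1):
--         if (i - x) % 2 == 1:
--             result.append("-1")
--         else:
--             result.append("1")
--     return " ".join(result)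
-- ===== SOURCE B (Python) =====
-- def solve(n, x, y):
--     p = max(0, y - 1)
--     m = max(0, x - y + 1)
--     s = max(0, n - x)
--     res = ["1"] * (p + m + s)
--     for j in range(y % 2, p, 2):
--         res[j] = "-1"
--     for j in range(p + m, p + m + s, 2):
--         res[j] = "-1"
--     return " ".join(res)
-- ===== Notes on version B (the rewrite author's own statement) =====
-- stated objective: simpler
-- what changed: A appends element by element through three loops with per-element parity branches; B allocates the whole answer as ones and overwrites only the minus-one positions with two stride-2 index loops.
import Mathlib
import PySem

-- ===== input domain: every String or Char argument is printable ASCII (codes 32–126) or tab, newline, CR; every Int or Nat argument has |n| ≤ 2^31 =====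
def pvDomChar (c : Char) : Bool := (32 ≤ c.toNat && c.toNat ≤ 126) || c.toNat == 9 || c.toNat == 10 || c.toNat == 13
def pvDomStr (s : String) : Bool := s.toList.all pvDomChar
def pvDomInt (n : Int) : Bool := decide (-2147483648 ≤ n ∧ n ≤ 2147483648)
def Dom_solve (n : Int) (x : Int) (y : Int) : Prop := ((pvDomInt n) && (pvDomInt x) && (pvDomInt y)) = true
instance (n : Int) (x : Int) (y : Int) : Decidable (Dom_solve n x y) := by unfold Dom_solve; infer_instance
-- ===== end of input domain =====

-- B replaces A's three forward-appending loops (with per-element parity branches) by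
-- fill-then-mark: allocate the whole list of "1"s and overwrite only the "-1" positions
-- with two stride-2 index loops (objective: simpler decomposition, same cost).

-- ===== PORT A =====
def solve (n : Int) (x : Int) (y : Int) : String :=
  let result : List String :=
    if PySem.Int.mod y 2 == 0 then
      (PySem.List.pyRange 1 y 1).foldl (fun acc i =>
        if PySem.Int.mod i 2 == 1 then acc ++ ["-1"] else acc ++ ["1"]) []
    else
      (PySem.List.pyRange 1 y 1).foldl (fun acc i =>
        if PySem.Int.mod i 2 == 1 then acc ++ ["1"] else acc ++ ["-1"]) []
  let result := result ++ PySem.List.pyRepeat ["1"] (x - y + 1)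
  let result := (PySem.List.pyRange (x + 1) (n + 1) 1).foldl (fun acc i =>
    if PySem.Int.mod (i - x) 2 == 1 then acc ++ ["-1"] else acc ++ ["1"]) result
  PySem.Str.join " " result

-- ===== PORT B =====
-- res[j] = "-1" is ported with pySetD: every index written lies inside the list
-- (j < p ≤ len, resp. p+m ≤ j < p+m+s ≤ len), so the total form is exact here.
def solve_alt (n : Int) (x : Int) (y : Int) : String :=
  let p := max 0 (y - 1)
  let m := max 0 (x - y + 1)
  let s := max 0 (n - x)
  let res := PySem.List.pyRepeat ["1"] (p + m + s)
  let res := (PySem.List.pyRange (PySem.Int.mod y 2) p 2).foldl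
    (fun acc j => PySem.List.pySetD acc j "-1") res
  let res := (PySem.List.pyRange (p + m) (p + m + s) 2).foldl
    (fun acc j => PySem.List.pySetD acc j "-1") res
  PySem.Str.join " " res

-- ===== PRECONDITION & SPEC =====
def Spec_solve (n : Int) (x : Int) (y : Int) (out : String) : Prop := out = solve_alt n x y
instance (n : Int) (x : Int) (y : Int) (out : String) : Decidable (Spec_solve n x y out) := by unfold Spec_solve; infer_instance

-- ===== CLAIM (what is proved, stated in full; the proofs are below) =====
def Claim_equal_solve : Prop := ∀ (n : Int) (x : Int) (y : Int), Dom_solve n x y → Spec_solve n x y (solve n x y)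

-- ===== LEMMAS AND PROOFS =====

-- length of B's marking loop: overwriting positions never changes the length
lemma length_foldl_pySetD (l : List Int) (res : List String) :
    (l.foldl (fun acc j => PySem.List.pySetD acc j "-1") res).length = res.length := by
  induction l generalizing res with
  | nil => rfl
  | cons i l ih => simp [ih, PySem.List.length_pySetD]

-- elementwise value of B's marking loop (all written indices are nonnegative)
lemma getElem?_foldl_pySetD (l : List Int) (res : List String) (k : Nat)
    (h : ∀ i ∈ l, 0 ≤ i) :
    (l.foldl (fun acc j => PySem.List.pySetD acc j "-1") res)[k]? =
      if (k : Int) ∈ l then (if k < res.length then some "-1" else none) else res[k]? := by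
  induction l generalizing res with
  | nil => simp
  | cons i l ih =>
    have hi : 0 ≤ i := h i (List.mem_cons_self ..)
    simp only [List.foldl_cons]
    rw [PySem.List.pySetD_of_nonneg _ _ hi, ih _ (fun j hj => h j (List.mem_cons_of_mem _ hj))]
    by_cases hk : (k : Int) ∈ l
    · simp [hk, List.length_set]
    · simp only [hk, if_false, List.mem_cons, List.getElem?_set, List.length_set]
      by_cases he : (k : Int) = i
      · have : i.toNat = k := by omega
        simp [he, this]
      · have : i.toNat ≠ k := by omega
        simp [he, this]

-- the central fact: A's appended list and B's marked list agree elementwise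
set_option maxHeartbeats 2000000 in
theorem solve_eq (n x y : Int) : solve n x y = solve_alt n x y := by
  simp only [solve, solve_alt, beq_iff_eq,
    PySem.Int.mod_eq_emod_of_pos (by norm_num : (0:Int) < 2)]
  apply congrArg
  have hb : ∀ (a b : String) (c : Int → Prop) [DecidablePred c] (l : List Int) (acc : List String),
      l.foldl (fun r i => if c i then r ++ [a] else r ++ [b]) acc =
        acc ++ l.map (fun i => if c i then a else b) := by
    intro a b c _ l acc
    have hfe : (fun (r : List String) i => if c i then r ++ [a] else r ++ [b])
        = fun r i => r ++ [if c i then a else b] := by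
      funext r i; by_cases h : c i <;> simp [h]
    rw [hfe, PySem.List.foldl_append_singleton_eq_map]
  have h1 : ∀ i ∈ PySem.List.pyRange (y % 2) (max 0 (y - 1)) 2, 0 ≤ i := by
    intro i hi
    rw [PySem.List.mem_pyRange_iff_of_pos (by norm_num)] at hi
    omega
  have h2 : ∀ i ∈ PySem.List.pyRange (max 0 (y - 1) + max 0 (x - y + 1))
      (max 0 (y - 1) + max 0 (x - y + 1) + max 0 (n - x)) 2, 0 ≤ i := by
    intro i hi
    rw [PySem.List.mem_pyRange_iff_of_pos (by norm_num)] at hi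
    omega
  by_cases hy : y % 2 = 0
  · rw [if_pos hy, hb, hb, PySem.List.pyRepeat_singleton, PySem.List.pyRepeat_singleton]
    apply List.ext_getElem?
    intro k
    rw [getElem?_foldl_pySetD _ _ k h2, length_foldl_pySetD,
      getElem?_foldl_pySetD _ _ k h1]
    simp only [List.nil_append, List.getElem?_append, List.length_append, List.length_map,
      List.length_replicate, PySem.List.length_pyRange_one, List.getElem?_map,
      PySem.List.getElem?_pyRange_one, List.getElem?_replicate, List.length_replicate,
      apply_ite (Option.map (fun i => if (i : Int) % 2 = 1 then ("-1" : String) else "1")),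
      apply_ite (Option.map (fun i => if ((i : Int) - x) % 2 = 1 then ("-1" : String) else "1")),
      Option.map_some, Option.map_none,
      PySem.List.mem_pyRange_iff_of_pos (by norm_num : (0:Int) < 2)]
    simp only [hy]
    have ex : ∀ j : Int, x + 1 + j - x = 1 + j := by intro j; ring
    have e4 : n + 1 - (x + 1) = n - x := by ring
    have e1 : max 0 (y - 1) = ((y - 1).toNat : Int) := by omega
    have e2 : max 0 (x - y + 1) = ((x - y + 1).toNat : Int) := by omega
    have e3 : max 0 (n - x) = ((n - x).toNat : Int) := by omega
    simp only [ex, e4, e1, e2, e3]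
    generalize (y - 1).toNat = P
    generalize (x - y + 1).toNat = M
    generalize (n - x).toNat = S
    clear hb h1 h2
    split_ifs <;> first | rfl | (exfalso; omega)
  · rw [if_neg hy, hb, hb, PySem.List.pyRepeat_singleton, PySem.List.pyRepeat_singleton]
    apply List.ext_getElem?
    intro k
    rw [getElem?_foldl_pySetD _ _ k h2, length_foldl_pySetD,
      getElem?_foldl_pySetD _ _ k h1]
    simp only [List.nil_append, List.getElem?_append, List.length_append, List.length_map,
      List.length_replicate, PySem.List.length_pyRange_one, List.getElem?_map,
      PySem.List.getElem?_pyRange_one, List.getElem?_replicate, List.length_replicate,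
      apply_ite (Option.map (fun i => if (i : Int) % 2 = 1 then ("1" : String) else "-1")),
      apply_ite (Option.map (fun i => if ((i : Int) - x) % 2 = 1 then ("-1" : String) else "1")),
      Option.map_some, Option.map_none,
      PySem.List.mem_pyRange_iff_of_pos (by norm_num : (0:Int) < 2)]
    have hy1 : y % 2 = 1 := by omega
    simp only [hy1]
    have ex : ∀ j : Int, x + 1 + j - x = 1 + j := by intro j; ring
    have e4 : n + 1 - (x + 1) = n - x := by ring
    have e1 : max 0 (y - 1) = ((y - 1).toNat : Int) := by omega
    have e2 : max 0 (x - y + 1) = ((x - y + 1).toNat : Int) := by omega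
    have e3 : max 0 (n - x) = ((n - x).toNat : Int) := by omega
    simp only [ex, e4, e1, e2, e3]
    generalize (y - 1).toNat = P
    generalize (x - y + 1).toNat = M
    generalize (n - x).toNat = S
    clear hb h1 h2
    split_ifs <;> first | rfl | (exfalso; omega)

-- ===== VERDICT (by name: the statement is the Claim_ definition above) =====
theorem solve_spec : Claim_equal_solve := by
  intro n x y _
  exact solve_eq n x y
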